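-- pv_equiv track=rewrite | github.com/quanpt-sfa/teaching | v1/schema_grader/utils/fuzzy.py | _get_abbreviation
-- ===== SOURCE A (Python) =====
-- def _get_abbreviation(text: str) -> str:
--     """Tạo từ viết tắt từ một chuỗi.
--     Ví dụ: NhaCungCap -> NCC, HangHoa -> HH
--     """
--     parts = []
--     current = []
--
--     for c in text:
--         if c.isupper() and current:
--             parts.append(''.join(current))
--             current = [c]
--         else:
--             current.append(c)
--     if current:
--         parts.append(''.join(current))
--
--     return ''.join(p[0].upper() for p in parts if p)
-- ===== SOURCE B (Python) =====
-- def _get_abbreviation(text: str) -> str: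
--     """Tao tu viet tat: first character plus every later uppercase character, uppercased."""
--     if not text:
--         return ''
--     return (text[0] + ''.join(c for c in text[1:] if c.isupper())).upper()
-- ===== Notes on version B (the rewrite author's own statement) =====
-- stated objective: simpler
-- what changed: Replaced the segment-buffer machinery (building camelCase parts then taking each part's first letter) by a direct one-pass character selection: text[0] plus every later uppercase character, uppercased once.
import Mathlib
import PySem

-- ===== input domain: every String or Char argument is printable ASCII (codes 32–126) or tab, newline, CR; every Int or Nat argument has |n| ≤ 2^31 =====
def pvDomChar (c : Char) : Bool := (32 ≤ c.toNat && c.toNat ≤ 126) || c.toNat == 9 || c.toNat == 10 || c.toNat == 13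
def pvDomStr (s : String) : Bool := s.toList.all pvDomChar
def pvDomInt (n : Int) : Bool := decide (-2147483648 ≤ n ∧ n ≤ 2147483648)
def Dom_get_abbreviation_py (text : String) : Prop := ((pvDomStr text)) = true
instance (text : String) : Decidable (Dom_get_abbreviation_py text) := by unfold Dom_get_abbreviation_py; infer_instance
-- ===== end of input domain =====

-- B replaces A's segment-buffer machinery by a direct character selection (simpler decomposition).

-- ===== PORT A =====
-- A's loop state: (parts, current); step for step as in the Python.
def pvStepA (st : List (List Char) × List Char) (c : Char) : List (List Char) × List Char :=
  if PySem.Chars.isupper c && !st.2.isEmpty then (st.1 ++ [st.2], [c])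
  else (st.1, st.2 ++ [c])

def get_abbreviation_py (text : String) : String :=
  let st := text.toList.foldl pvStepA ([], [])
  let parts := if st.2.isEmpty then st.1 else st.1 ++ [st.2]
  String.ofList ((parts.filter (fun p => !p.isEmpty)).map (fun p => PySem.Chars.upperChar p.headI))

-- ===== PORT B =====
def get_abbreviation_py_alt (text : String) : String :=
  match text.toList with
  | [] => ""
  | c :: rest => PySem.Str.upper (String.ofList (c :: rest.filter PySem.Chars.isupper))

-- ===== PRECONDITION & SPEC =====
def Spec_get_abbreviation_py (text : String) (out : String) : Prop := out = get_abbreviation_py_alt text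
instance (text : String) (out : String) : Decidable (Spec_get_abbreviation_py text out) := by unfold Spec_get_abbreviation_py; infer_instance

-- ===== CLAIM (what is proved, stated in full; the proofs are below) =====
def Claim_equal_get_abbreviation_py : Prop := ∀ (text : String), Dom_get_abbreviation_py text → Spec_get_abbreviation_py text (get_abbreviation_py text)

-- ===== LEMMAS AND PROOFS =====

-- A's result read off the final fold state.
def pvExtract (st : List (List Char) × List Char) : List Char :=
  ((if st.2.isEmpty then st.1 else st.1 ++ [st.2]).filter (fun p => !p.isEmpty)).map
    (fun p => PySem.Chars.upperChar p.headI)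

lemma pvFoldA_extract (cs : List Char) (parts : List (List Char)) (current : List Char)
    (h : current ≠ []) :
    pvExtract (cs.foldl pvStepA (parts, current)) =
      pvExtract (parts, current) ++ (cs.filter PySem.Chars.isupper).map PySem.Chars.upperChar := by
  induction cs generalizing parts current with
  | nil => simp
  | cons c cs ih =>
    by_cases hu : PySem.Chars.isupper c = true
    · have hstep : (c :: cs).foldl pvStepA (parts, current) =
          cs.foldl pvStepA (parts ++ [current], [c]) := by
        simp [pvStepA, hu, List.isEmpty_eq_false_iff.mpr h]
      rw [hstep, ih _ [c] (by simp)]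
      simp [pvExtract, List.isEmpty_eq_false_iff.mpr h, List.filter_append, hu]
    · have hstep : (c :: cs).foldl pvStepA (parts, current) =
          cs.foldl pvStepA (parts, current ++ [c]) := by
        simp [pvStepA, hu]
      rw [hstep, ih _ (current ++ [c]) (by simp)]
      have hhead : (current ++ [c]).headI = current.headI := by
        cases current with
        | nil => exact absurd rfl h
        | cons a t => simp
      simp [pvExtract, List.isEmpty_eq_false_iff.mpr h, hu, hhead]

-- ===== VERDICT (by name: the statement is the Claim_ definition above) =====
theorem get_abbreviation_py_spec : Claim_equal_get_abbreviation_py := by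
  intro text _
  unfold Spec_get_abbreviation_py get_abbreviation_py get_abbreviation_py_alt
  cases htl : text.toList with
  | nil => simp
  | cons c rest =>
    rw [← String.toList_inj]
    have h1 : (c :: rest).foldl pvStepA ([], []) = rest.foldl pvStepA ([], [c]) := by
      simp [pvStepA]
    have h2 := pvFoldA_extract rest [] [c] (by simp)
    simp only [h1]
    show (String.ofList (pvExtract (rest.foldl pvStepA ([], [c])))).toList = _
    rw [h2, PySem.Str.toList_upper]
    simp [pvExtract, PySem.Chars.upper]
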